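-- pv_equiv track=rewrite | github.com/gongxings/ai-creator | backend/app/services/ai/template_parser.py | _infer_slide_type
-- ===== SOURCE A (Python) =====
-- from typing import Dict, Any, List, Optional
--
-- def _infer_slide_type(placeholders: List[Dict], index: int) -> str:
--     """
--     根据占位符推断幻灯片类型
--
--     Args:
--         placeholders: 占位符列表
--         index: 幻灯片索引
--
--     Returns:
--         幻灯片类型
--     """
--     if index == 0:
--         # 第一页通常是标题页
--         has_subtitle = any(p["type"] == "subtitle" for p in placeholders)
--         if has_subtitle:
--             return "title"
--
--     # 检查是否有标题和正文
--     has_title = any(p["type"] == "title" for p in placeholders)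
--     has_body = any(p["type"] == "body" for p in placeholders)
--
--     if has_title and has_body:
--         return "content"
--     elif has_title and not has_body:
--         return "section"
--
--     return "content"
-- ===== SOURCE B (Python) =====
-- def _infer_slide_type(placeholders, index):
--     # Single left-to-right pass with an accumulator and sound early exits,
--     # instead of three staged any()-scans.
--     has_title = False
--     has_body = False
--     for p in placeholders:
--         t = p["type"]
--         if t == "subtitle" and index == 0:
--             return "title"
--         has_title = has_title or t == "title"
--         has_body = has_body or t == "body"
--         if has_body and index != 0:
--             # outcome is "content" regardless of the rest
--             return "content"
--     return "section" if has_title and not has_body else "content"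
-- ===== Notes on version B (the rewrite author's own statement) =====
-- stated objective: alternative
-- what changed: B replaces A's three staged any()-scans and four-way branch by one left-to-right pass with boolean accumulators and sound early exits (return 'title' on the first subtitle when index==0; return 'content' as soon as a body is seen when index!=0), deciding the final section/content split from the accumulated flags.
-- outside the precondition, e.g. on _infer_slide_type([{'type': 'subtitle'}, {}], 0): A returns 'title', B returns 'title'
import Mathlib
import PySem

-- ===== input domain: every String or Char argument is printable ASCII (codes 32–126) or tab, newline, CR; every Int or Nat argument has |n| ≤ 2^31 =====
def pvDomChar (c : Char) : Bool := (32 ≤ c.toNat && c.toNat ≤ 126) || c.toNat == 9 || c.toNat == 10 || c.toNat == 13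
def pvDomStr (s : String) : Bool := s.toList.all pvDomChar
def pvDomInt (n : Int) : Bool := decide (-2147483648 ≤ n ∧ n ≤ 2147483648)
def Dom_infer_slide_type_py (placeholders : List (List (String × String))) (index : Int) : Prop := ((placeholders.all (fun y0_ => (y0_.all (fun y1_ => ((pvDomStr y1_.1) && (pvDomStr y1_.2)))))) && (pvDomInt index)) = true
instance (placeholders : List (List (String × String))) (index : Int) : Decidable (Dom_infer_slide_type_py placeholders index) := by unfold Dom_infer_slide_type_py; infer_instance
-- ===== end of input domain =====

-- B replaces A's three staged any()-scans by one pass with boolean accumulators and sound early exits; same return value on well-formed placeholders (proved below).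
-- ===== PORT A =====
-- p["type"] : first-match lookup; Pre_ guarantees the key is present (none = KeyError is excluded by Pre_)
def pvTypeOf (p : List (String × String)) : String :=
  ((PySem.Dict.mk p).get? "type").getD ""

def infer_slide_type_py (placeholders : List (List (String × String))) (index : Int) : String :=
  if index = 0 ∧ placeholders.any (fun p => pvTypeOf p == "subtitle") then "title"
  else
    let has_title := placeholders.any (fun p => pvTypeOf p == "title")
    let has_body := placeholders.any (fun p => pvTypeOf p == "body")
    if has_title && has_body then "content"
    else if has_title && !has_body then "section"
    else "content"

-- ===== PORT B =====
-- the for-loop of Source B: one pass, accumulators has_title/has_body, early returns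
def inferGo (index : Int) : List (List (String × String)) → Bool → Bool → String
  | [], has_title, has_body =>
      if has_title && !has_body then "section" else "content"
  | p :: rest, has_title, has_body =>
      let t := pvTypeOf p
      if t == "subtitle" ∧ index = 0 then "title"
      else
        let has_title' := has_title || (t == "title")
        let has_body' := has_body || (t == "body")
        if has_body' && decide (index ≠ 0) then "content"
        else inferGo index rest has_title' has_body'

def infer_slide_type_py_alt (placeholders : List (List (String × String))) (index : Int) : String :=
  inferGo index placeholders false false

-- ===== PRECONDITION & SPEC =====
-- Pre_ excludes placeholders dicts missing the "type" key: there the Python programs raise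
-- KeyError, except where a short-circuit / early return hides the malformed dict.
def Pre_infer_slide_type_py (placeholders : List (List (String × String))) (index : Int) : Prop :=
  ∀ p ∈ placeholders, ((PySem.Dict.mk p).get? "type").isSome

instance (placeholders : List (List (String × String))) (index : Int) : Decidable (Pre_infer_slide_type_py placeholders index) := by unfold Pre_infer_slide_type_py; infer_instance

def pvWitness_infer_slide_type_py : (List (List (String × String))) × Int := ([[("type", "title")], [("type", "body")]], 1)

def Spec_infer_slide_type_py (placeholders : List (List (String × String))) (index : Int) (out : String) : Prop := out = infer_slide_type_py_alt placeholders index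
instance (placeholders : List (List (String × String))) (index : Int) (out : String) : Decidable (Spec_infer_slide_type_py placeholders index out) := by unfold Spec_infer_slide_type_py; infer_instance

-- ===== CLAIM (what is proved, stated in full; the proofs are below) =====
def Claim_equal_infer_slide_type_py : Prop := ∀ (placeholders : List (List (String × String))) (index : Int), Dom_infer_slide_type_py placeholders index → Pre_infer_slide_type_py placeholders index → Spec_infer_slide_type_py placeholders index (infer_slide_type_py placeholders index)

-- ===== LEMMAS AND PROOFS =====

-- characterisation of B's single pass for arbitrary accumulator values
theorem inferGo_eq (index : Int) (ps : List (List (String × String))) (ht hb : Bool) :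
    inferGo index ps ht hb =
      if index = 0 ∧ ps.any (fun p => pvTypeOf p == "subtitle") then "title"
      else if (ht || ps.any (fun p => pvTypeOf p == "title"))
              && !(hb || ps.any (fun p => pvTypeOf p == "body")) then "section"
      else "content" := by
  induction ps generalizing ht hb with
  | nil => simp [inferGo]
  | cons p rest ih =>
    simp only [inferGo, List.any_cons]
    by_cases hi : index = 0
    · subst hi
      by_cases hsub : pvTypeOf p = "subtitle"
      · simp [hsub]
      · simp [hsub, ih, Bool.or_assoc]
    · have hg : ¬ ((pvTypeOf p == "subtitle") = true ∧ index = 0) := fun h => hi h.2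
      rw [if_neg hg]
      by_cases hbody : (hb || (pvTypeOf p == "body")) = true
      · rw [if_pos (by simp [hbody, hi])]
        have h2 : (hb || (pvTypeOf p == "body" || rest.any fun q => pvTypeOf q == "body")) = true := by
          rcases Bool.or_eq_true_iff.mp hbody with h | h <;> simp [h]
        simp [hi, h2]
      · rw [if_neg (by simp [hbody])]
        rw [ih]
        simp [hi, Bool.or_assoc]

-- ===== VERDICT (by name: the statement is the Claim_ definition above) =====
theorem infer_slide_type_py_spec : Claim_equal_infer_slide_type_py := by
  intro placeholders index _ _
  unfold Spec_infer_slide_type_py infer_slide_type_py infer_slide_type_py_alt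
  rw [inferGo_eq]
  by_cases hs : index = 0 ∧ placeholders.any (fun p => pvTypeOf p == "subtitle") = true
  · simp [hs]
  · simp only [if_neg hs]
    by_cases ht : placeholders.any (fun p => pvTypeOf p == "title") = true <;>
      by_cases hb : placeholders.any (fun p => pvTypeOf p == "body") = true <;>
      simp [ht, hb]
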